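-- pv_equiv track=rewrite | github.com/TCGWarez/MarketplaceHealthDashboard | mp_r2_agent.py | _infer_sales_sort_keys
-- ===== SOURCE A (Python) =====
-- def _infer_sales_sort_keys(question: str) -> list[str]:
--     """Pick one or more ranking metrics from common sales wording."""
--     lower_question = question.lower()
--     wants_volume = any(term in lower_question for term in ("volume", "units sold", "most sold"))
--     wants_revenue = any(term in lower_question for term in ("revenue", "gross", "sales dollars"))
--     if wants_volume and wants_revenue:
--         return ["units_sold", "gross_cents"]
--     if wants_revenue:
--         return ["gross_cents"]
--     return ["units_sold"]
-- ===== SOURCE B (Python) =====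
-- _KEYWORD_METRICS = [
--     ("volume", "units_sold"),
--     ("units sold", "units_sold"),
--     ("most sold", "units_sold"),
--     ("revenue", "gross_cents"),
--     ("gross", "gross_cents"),
--     ("sales dollars", "gross_cents"),
-- ]
--
--
-- def _infer_sales_sort_keys(question: str) -> list[str]:
--     """Pick one or more ranking metrics from common sales wording."""
--     lower_question = question.lower()
--     keys = []
--     for term, metric in _KEYWORD_METRICS:
--         if term in lower_question and metric not in keys:
--             keys.append(metric)
--     return keys or ["units_sold"]
-- ===== Notes on version B (the rewrite author's own statement) =====
-- stated objective: alternative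
-- what changed: Replaces the two any(...) flags and the branch chain with a single data-driven pass over a keyword-to-metric table, appending each metric once in table order with an empty-list default.
import Mathlib
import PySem

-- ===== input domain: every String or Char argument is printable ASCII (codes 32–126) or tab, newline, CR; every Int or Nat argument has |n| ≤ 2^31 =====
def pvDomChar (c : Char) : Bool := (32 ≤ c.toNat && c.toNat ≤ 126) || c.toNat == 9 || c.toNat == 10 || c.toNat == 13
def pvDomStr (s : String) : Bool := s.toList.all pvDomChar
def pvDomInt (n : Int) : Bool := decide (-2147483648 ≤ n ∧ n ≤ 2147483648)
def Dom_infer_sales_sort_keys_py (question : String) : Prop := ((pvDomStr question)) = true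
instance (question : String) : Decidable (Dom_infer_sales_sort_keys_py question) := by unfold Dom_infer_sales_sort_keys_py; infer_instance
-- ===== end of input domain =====

-- B replaces A's two any(...) flags and branch chain with one data-driven fold over a keyword-to-metric table (objective: alternative decomposition).

-- ===== PORT A =====
def infer_sales_sort_keys_py (question : String) : List String :=
  let lower_question := PySem.Str.lower question
  let wants_volume := ["volume", "units sold", "most sold"].any (fun term => PySem.Str.isIn term lower_question)
  let wants_revenue := ["revenue", "gross", "sales dollars"].any (fun term => PySem.Str.isIn term lower_question)
  if wants_volume && wants_revenue then ["units_sold", "gross_cents"]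
  else if wants_revenue then ["gross_cents"]
  else ["units_sold"]

-- ===== PORT B =====
def pvKeywordMetrics : List (String × String) :=
  [("volume", "units_sold"), ("units sold", "units_sold"), ("most sold", "units_sold"),
   ("revenue", "gross_cents"), ("gross", "gross_cents"), ("sales dollars", "gross_cents")]

def infer_sales_sort_keys_py_alt (question : String) : List String :=
  let lower_question := PySem.Str.lower question
  let keys := pvKeywordMetrics.foldl
    (fun keys p =>
      if PySem.Str.isIn p.1 lower_question && !(keys.contains p.2) then keys ++ [p.2] else keys)
    []
  if keys = [] then ["units_sold"] else keys

-- ===== PRECONDITION & SPEC =====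
def Spec_infer_sales_sort_keys_py (question : String) (out : List String) : Prop := out = infer_sales_sort_keys_py_alt question
instance (question : String) (out : List String) : Decidable (Spec_infer_sales_sort_keys_py question out) := by unfold Spec_infer_sales_sort_keys_py; infer_instance

-- ===== CLAIM (what is proved, stated in full; the proofs are below) =====
def Claim_equal_infer_sales_sort_keys_py : Prop := ∀ (question : String), Dom_infer_sales_sort_keys_py question → Spec_infer_sales_sort_keys_py question (infer_sales_sort_keys_py question)

-- ===== LEMMAS AND PROOFS =====
-- Case analysis over the six keyword-match booleans: A's branch chain and B's table fold agree.
set_option maxHeartbeats 1000000 in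
theorem pv_key_cases : ∀ b1 b2 b3 b4 b5 b6 : Bool,
    (if (b1 || (b2 || (b3 || false))) && (b4 || (b5 || (b6 || false))) then
      ["units_sold", "gross_cents"]
    else if (b4 || (b5 || (b6 || false))) then ["gross_cents"]
    else ["units_sold"]) =
    (let k0 : List String := []
     let k1 := if b1 && !(k0.contains "units_sold") then k0 ++ ["units_sold"] else k0
     let k2 := if b2 && !(k1.contains "units_sold") then k1 ++ ["units_sold"] else k1
     let k3 := if b3 && !(k2.contains "units_sold") then k2 ++ ["units_sold"] else k2
     let k4 := if b4 && !(k3.contains "gross_cents") then k3 ++ ["gross_cents"] else k3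
     let k5 := if b5 && !(k4.contains "gross_cents") then k4 ++ ["gross_cents"] else k4
     let k6 := if b6 && !(k5.contains "gross_cents") then k5 ++ ["gross_cents"] else k5
     if k6 = [] then ["units_sold"] else k6) := by decide

-- ===== VERDICT (by name: the statement is the Claim_ definition above) =====
theorem infer_sales_sort_keys_py_spec : Claim_equal_infer_sales_sort_keys_py := by
  intro question _
  exact pv_key_cases
    (PySem.Str.isIn "volume" (PySem.Str.lower question))
    (PySem.Str.isIn "units sold" (PySem.Str.lower question))
    (PySem.Str.isIn "most sold" (PySem.Str.lower question))
    (PySem.Str.isIn "revenue" (PySem.Str.lower question))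
    (PySem.Str.isIn "gross" (PySem.Str.lower question))
    (PySem.Str.isIn "sales dollars" (PySem.Str.lower question))
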